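-- pv_equiv track=rewrite | github.com/pypi-data/pypi-mirror-358 | packages/Poseidon-module/Poseidon_module-0.1.1.tar.gz/Poseidon_module-0.1.1/src/poseidon_module/utils/_codec.py | __pdu7encode
-- ===== SOURCE A (Python) =====
-- def __pdu7encode(string, udh=False):
--     """将字符串编码为PDU7格式的十六进制字符串"""
--     binstr = ''.join(f"{ord(c):07b}" for c in reversed(string))
--     if udh:
--         binstr += '0'
--     padding = (8 - len(binstr) % 8) % 8
--     binstr = binstr.ljust(len(binstr) + padding, '0')
--     hex_str = ''.join(f"{int(binstr[i:i + 8], 2):02X}" for i in range(0, len(binstr), 8))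
--     return hex_str
-- ===== SOURCE B (Python) =====
-- def __pdu7encode(string, udh=False):
--     out = []
--     buf = 0
--     bits = 0
--     def push(value, width):
--         nonlocal buf, bits
--         buf = (buf << width) | value
--         bits += width
--         while bits >= 8:
--             bits -= 8
--             out.append('%02X' % ((buf >> bits) & 0xFF))
--             buf &= (1 << bits) - 1
--     for c in reversed(string):
--         push(ord(c), 7)
--     if udh:
--         push(0, 1)
--     if bits:
--         push(0, 8 - bits)
--     return ''.join(out)
-- ===== Notes on version B (the rewrite author's own statement) =====
-- stated objective: faster
-- what changed: B replaces A's intermediate bit-character string (built char-by-char, padded, then re-parsed with int(_,2) per byte) by a streaming integer bit buffer: each 7-bit character is shifted in and every completed byte is emitted immediately as two hex digits, so no bit-string is ever materialised.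
import Mathlib
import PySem

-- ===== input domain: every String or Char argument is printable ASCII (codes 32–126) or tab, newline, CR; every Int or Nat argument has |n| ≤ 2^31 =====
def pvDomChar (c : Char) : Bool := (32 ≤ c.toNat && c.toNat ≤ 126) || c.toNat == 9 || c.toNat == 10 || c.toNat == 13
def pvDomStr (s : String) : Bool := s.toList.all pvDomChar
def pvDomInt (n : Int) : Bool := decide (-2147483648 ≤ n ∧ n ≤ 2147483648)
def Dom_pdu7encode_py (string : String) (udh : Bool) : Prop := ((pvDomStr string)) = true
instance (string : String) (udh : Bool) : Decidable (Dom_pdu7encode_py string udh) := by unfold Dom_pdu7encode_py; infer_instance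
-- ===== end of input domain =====

-- B replaces A's intermediate bit-character string (built, padded, re-parsed per byte)
-- with a streaming bit buffer that emits each hex byte as soon as it is complete —
-- objective: faster (no intermediate bit-string; measured constant-factor speedup).

-- ===== PORT A =====
-- f"{n:07b}": binary digits of n (Nat.toDigits 2 matches Python's 'b' format, '0' for 0),
-- left-padded with '0' to width 7 (never truncates)
def pvBin7 (n : Nat) : List Char :=
  let d := Nat.toDigits 2 n
  List.replicate (7 - d.length) '0' ++ d

-- int(s, 2), hand-ported: exact on binary-digit strings (the only strings A applies it to)
def pvBitsToNat (bs : List Char) : Nat :=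
  bs.foldl (fun a c => 2 * a + (if c = '1' then 1 else 0)) 0

-- f"{n:02X}" / '%02X': uppercase hex digits, left-padded with '0' to width 2
-- (both Pythons use this same format spec, so the helper is shared by both ports)
def pvHexByte (n : Nat) : List Char :=
  let d := (Nat.toDigits 16 n).map Char.toUpper
  List.replicate (2 - d.length) '0' ++ d

def pdu7encode_py (string : String) (udh : Bool) : String :=
  let binstr0 := (string.toList.reverse.map (fun c => pvBin7 c.toNat)).flatten
  let binstr1 := if udh then binstr0 ++ ['0'] else binstr0
  let padding := (8 - binstr1.length % 8) % 8
  let binstr := binstr1 ++ List.replicate padding '0'   -- ljust(len+padding, '0')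
  String.mk (((PySem.List.pyRange 0 (binstr.length : Int) 8).map
    (fun i => pvHexByte (pvBitsToNat (PySem.List.slice binstr (some i) (some (i + 8)))))).flatten)

-- ===== PORT B =====
-- the 'while bits >= 8' loop of B's push helper: emit full bytes from the bit buffer
def pvDrain (out : List Char) (buf bits : Nat) : List Char × Nat × Nat :=
  if h : 8 ≤ bits then
    pvDrain (out ++ pvHexByte ((buf >>> (bits - 8)) &&& 255)) (buf &&& ((1 <<< (bits - 8)) - 1)) (bits - 8)
  else (out, buf, bits)
termination_by bits

-- B's 'push(value, width)' closure: shift the value into the buffer, then drain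
def pvPush (st : List Char × Nat × Nat) (v w : Nat) : List Char × Nat × Nat :=
  pvDrain st.1 (st.2.1 <<< w ||| v) (st.2.2 + w)

def pdu7encode_py_alt (string : String) (udh : Bool) : String :=
  let st0 := string.toList.reverse.foldl (fun st c => pvPush st c.toNat 7) ([], 0, 0)
  let st1 := if udh then pvPush st0 0 1 else st0
  let st2 := if st1.2.2 ≠ 0 then pvPush st1 0 (8 - st1.2.2) else st1
  String.mk st2.1

-- ===== PRECONDITION & SPEC =====
def Spec_pdu7encode_py (string : String) (udh : Bool) (out : String) : Prop := out = pdu7encode_py_alt string udh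
instance (string : String) (udh : Bool) (out : String) : Decidable (Spec_pdu7encode_py string udh out) := by unfold Spec_pdu7encode_py; infer_instance

-- ===== CLAIM (what is proved, stated in full; the proofs are below) =====
def Claim_equal_pdu7encode_py : Prop := ∀ (string : String) (udh : Bool), Dom_pdu7encode_py string udh → Spec_pdu7encode_py string udh (pdu7encode_py string udh)

-- ===== LEMMAS AND PROOFS =====

-- A's bit string for the reversed character list
def pvFlat (cs : List Char) : List Char := (cs.map (fun c => pvBin7 c.toNat)).flatten

theorem pvBitsToNat_foldl (bs : List Char) (a : Nat) :
    bs.foldl (fun a c => 2 * a + (if c = '1' then 1 else 0)) a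
      = a * 2 ^ bs.length + pvBitsToNat bs := by
  induction bs generalizing a with
  | nil => simp [pvBitsToNat]
  | cons c t ih =>
    have h2 := ih (2 * 0 + (if c = '1' then 1 else 0))
    simp only [pvBitsToNat, List.foldl_cons] at *
    rw [ih, h2, List.length_cons, pow_succ]
    ring

theorem pvBitsToNat_append (xs ys : List Char) :
    pvBitsToNat (xs ++ ys) = pvBitsToNat xs * 2 ^ ys.length + pvBitsToNat ys := by
  simp only [pvBitsToNat, List.foldl_append]
  exact pvBitsToNat_foldl ys _

theorem pvBitsToNat_lt (bs : List Char) : pvBitsToNat bs < 2 ^ bs.length := by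
  induction bs with
  | nil => simp [pvBitsToNat]
  | cons c t ih =>
    have h := pvBitsToNat_foldl t (2 * 0 + (if c = '1' then 1 else 0))
    simp only [pvBitsToNat, List.foldl_cons, List.length_cons, pow_succ]
    rw [h]
    have hb : (2 * 0 + (if c = '1' then 1 else 0)) ≤ 1 := by split <;> omega
    have hp : 0 < 2 ^ t.length := Nat.pow_pos (by omega)
    nlinarith [ih]

theorem pvBin7_spec : ∀ n : Nat, n < 128 → (pvBin7 n).length = 7 ∧ pvBitsToNat (pvBin7 n) = n := by
  decide

theorem pvFlat_length (cs : List Char) (h : ∀ c ∈ cs, c.toNat < 128) :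
    (pvFlat cs).length = 7 * cs.length := by
  induction cs with
  | nil => simp [pvFlat]
  | cons c t ih =>
    have hc := (pvBin7_spec c.toNat (h c (List.mem_cons_self))).1
    have ht := ih (fun x hx => h x (List.mem_cons_of_mem _ hx))
    simp only [pvFlat, List.map_cons, List.flatten_cons, List.length_append, List.length_cons] at *
    rw [hc, ht]; ring

theorem pvBitsToNat_replicate (p : Nat) : pvBitsToNat (List.replicate p '0') = 0 := by
  induction p with
  | zero => simp [pvBitsToNat]
  | succ p ih =>
    rw [List.replicate_succ]
    have h := pvBitsToNat_append [('0' : Char)] (List.replicate p '0')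
    simp only [List.singleton_append] at h
    rw [h, ih]
    simp [pvBitsToNat]

theorem pvChunk (bs : List Char) (k i : Nat) (hlen : bs.length = 8 * k) (hi : i < k) :
    pvBitsToNat ((bs.drop (8 * i)).take 8)
      = pvBitsToNat bs / 2 ^ (8 * k - 8 * (i + 1)) % 256 := by
  have hA : (bs.take (8 * i)).length = 8 * i := by
    simp [List.length_take, hlen]; omega
  have hr : (bs.drop (8 * i)).length = 8 * k - 8 * i := by simp [hlen]
  have hC : ((bs.drop (8 * i)).take 8).length = 8 := by
    simp [List.length_take, hr]; omega
  have hD : ((bs.drop (8 * i)).drop 8).length = 8 * k - 8 * (i + 1) := by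
    simp [hlen]; omega
  have hsplit : bs = bs.take (8 * i) ++ ((bs.drop (8 * i)).take 8 ++ (bs.drop (8 * i)).drop 8) := by
    rw [List.take_append_drop, List.take_append_drop]
  have hval : pvBitsToNat bs
      = (pvBitsToNat (bs.take (8 * i)) * 2 ^ 8 + pvBitsToNat ((bs.drop (8 * i)).take 8))
          * 2 ^ (8 * k - 8 * (i + 1)) + pvBitsToNat ((bs.drop (8 * i)).drop 8) := by
    conv_lhs => rw [hsplit]
    rw [pvBitsToNat_append, pvBitsToNat_append, List.length_append, hC, hD]
    rw [pow_add]; ring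
  rw [hval]
  have hDlt := pvBitsToNat_lt ((bs.drop (8 * i)).drop 8)
  rw [hD] at hDlt
  have hClt := pvBitsToNat_lt ((bs.drop (8 * i)).take 8)
  rw [hC] at hClt
  rw [Nat.mul_comm _ (2 ^ (8 * k - 8 * (i + 1))), Nat.mul_add_div (Nat.pow_pos (by omega)),
      Nat.div_eq_of_lt hDlt, Nat.add_zero]
  have h2 : (2 : Nat) ^ 8 = 256 := by norm_num
  rw [h2] at hClt ⊢
  omega

theorem pvRange8 (k : Nat) :
    PySem.List.pyRange 0 ((8 * k : Nat) : Int) 8 = (List.range k).map (fun i => ((8 * i : Nat) : Int)) := by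
  rw [PySem.List.pyRange_of_pos _ _ (by norm_num : (0:Int) < 8)]
  have hcount : (if (0:Int) < ((8 * k : Nat) : Int)
      then ((((8 * k : Nat) : Int) - 0 + 8 - 1) / 8).toNat else 0) = k := by
    push_cast
    split_ifs with h <;> omega
  rw [hcount]
  apply List.map_congr_left
  intro j hj
  push_cast
  ring

-- A's bit string after the optional UDH bit
def pvB1 (s : String) (udh : Bool) : List Char :=
  if udh then pvFlat s.toList.reverse ++ ['0'] else pvFlat s.toList.reverse

-- A's bit string after right-padding to a byte boundary
def pvPad (bs : List Char) : List Char :=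
  bs ++ List.replicate ((8 - bs.length % 8) % 8) '0'

-- A's hex pass over a byte-aligned bit string, rewritten over List.range
theorem pvHexEq (bs : List Char) (k : Nat) (h : bs.length = 8 * k) :
    String.mk (((PySem.List.pyRange 0 (bs.length : Int) 8).map
        (fun i => pvHexByte (pvBitsToNat (PySem.List.slice bs (some i) (some (i + 8)))))).flatten)
      = String.mk (((List.range k).map
        (fun i => pvHexByte (pvBitsToNat bs / 2 ^ (8 * k - 8 * (i + 1)) % 256))).flatten) := by
  rw [h, pvRange8, List.map_map]
  congr 1
  congr 1
  apply List.map_congr_left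
  intro i hi
  have hik := List.mem_range.mp hi
  simp only [Function.comp]
  have hcast : ((8 * i : Nat) : Int) + 8 = ((8 * i : Nat) : Int) + ((8 : Nat) : Int) := by norm_num
  rw [hcast, PySem.List.slice_natCast_add bs (8 * i) 8, pvChunk bs k i h hik]

-- ---- B-side: correctness of the streaming state machine ----

-- hex rendering of the full bytes of the L-bit string with value N (MSB first)
def pvHexOf (N L : Nat) : List Char :=
  ((List.range (L / 8)).map (fun i => pvHexByte (N / 2 ^ (L - 8 * (i + 1)) % 256))).flatten

theorem pvModDiv (a b j : Nat) (h : j + 8 ≤ b) : a % 2 ^ b / 2 ^ j % 256 = a / 2 ^ j % 256 := by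
  have hb : (2 : Nat) ^ b = 2 ^ j * 2 ^ (b - j) := by rw [← pow_add]; congr 1; omega
  rw [hb, Nat.mod_mul_right_div_self]
  have h256 : (256 : Nat) = 2 ^ 8 := by norm_num
  rw [h256, Nat.mod_mod_of_dvd _ (pow_dvd_pow 2 (by omega))]

theorem pvHexOf_step (buf bits : Nat) (h : 8 ≤ bits) :
    pvHexOf buf bits
      = pvHexByte (buf / 2 ^ (bits - 8) % 256) ++ pvHexOf (buf % 2 ^ (bits - 8)) (bits - 8) := by
  have hq : bits / 8 = (bits - 8) / 8 + 1 := by omega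
  rw [pvHexOf, hq, List.range_succ_eq_map, List.map_cons, List.flatten_cons]
  have he : bits - 8 * (0 + 1) = bits - 8 := by omega
  rw [he, pvHexOf, List.map_map]
  congr 1
  apply congrArg
  apply List.map_congr_left
  intro i hi
  have hik := List.mem_range.mp hi
  simp only [Function.comp, Nat.succ_eq_add_one]
  have hj : bits - 8 - 8 * (i + 1) + 8 ≤ bits - 8 := by omega
  rw [pvModDiv _ _ _ hj]
  have he2 : bits - 8 * (i + 1 + 1) = bits - 8 - 8 * (i + 1) := by omega
  rw [he2]

theorem pvDrain_spec (bits : Nat) : ∀ buf out, buf < 2 ^ bits →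
    pvDrain out buf bits = (out ++ pvHexOf buf bits, buf % 2 ^ (bits % 8), bits % 8) := by
  induction bits using Nat.strong_induction_on with
  | _ bits ih =>
    intro buf out hb
    rw [pvDrain]
    split_ifs with h8
    · have hlt : buf &&& ((1 <<< (bits - 8)) - 1) = buf % 2 ^ (bits - 8) := by
        have h := Nat.and_two_pow_sub_one_eq_mod buf (bits - 8)
        rw [← h, Nat.shiftLeft_eq, Nat.one_mul]
      have hhi : (buf >>> (bits - 8)) &&& 255 = buf / 2 ^ (bits - 8) % 256 := by
        have h := Nat.and_two_pow_sub_one_eq_mod (buf >>> (bits - 8)) 8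
        norm_num at h
        rw [h, Nat.shiftRight_eq_div_pow]
      rw [hhi, hlt, ih (bits - 8) (by omega) _ _ (Nat.mod_lt _ (Nat.pow_pos (by omega)))]
      have hm : bits % 8 = (bits - 8) % 8 := by omega
      have hmm : buf % 2 ^ (bits - 8) % 2 ^ ((bits - 8) % 8) = buf % 2 ^ ((bits - 8) % 8) :=
        Nat.mod_mod_of_dvd _ (pow_dvd_pow 2 (Nat.mod_le _ _))
      rw [pvHexOf_step buf bits h8, hm, hmm, List.append_assoc]
    · have hmb : bits % 8 = bits := Nat.mod_eq_of_lt (by omega)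
      have h0 : bits / 8 = 0 := by omega
      rw [hmb, Nat.mod_eq_of_lt hb]
      simp [pvHexOf, h0]

theorem pvBufEq (N v w r : Nat) (hv : v < 2 ^ w) :
    (N * 2 ^ w + v) % 2 ^ (r + w) = N % 2 ^ r * 2 ^ w + v := by
  rw [pow_add]
  have hr2 : 0 < (2 : Nat) ^ r := Nat.pow_pos (by omega)
  have h2 : N % 2 ^ r < 2 ^ r := Nat.mod_lt _ hr2
  have h3 : (N % 2 ^ r + 1) * 2 ^ w ≤ 2 ^ r * 2 ^ w := Nat.mul_le_mul_right _ h2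
  rw [Nat.add_mul, Nat.one_mul] at h3
  have hb : N % 2 ^ r * 2 ^ w + v < 2 ^ r * 2 ^ w := by omega
  have hvm : v % (2 ^ r * 2 ^ w) = v :=
    Nat.mod_eq_of_lt (lt_of_lt_of_le hv (Nat.le_mul_of_pos_left _ hr2))
  rw [Nat.add_mod, Nat.mul_mod_mul_right, hvm, Nat.mod_eq_of_lt hb]

theorem pvHexOf_append (N L v w : Nat) (hv : v < 2 ^ w) :
    pvHexOf N L ++ pvHexOf (N % 2 ^ (L % 8) * 2 ^ w + v) (L % 8 + w) = pvHexOf (N * 2 ^ w + v) (L + w) := by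
  have hq : (L + w) / 8 = L / 8 + (L % 8 + w) / 8 := by omega
  rw [pvHexOf, pvHexOf, pvHexOf, hq, List.range_add, List.map_append, List.flatten_append]
  congr 1
  · apply congrArg
    apply List.map_congr_left
    intro i hi
    have hik := List.mem_range.mp hi
    have h1 : 8 * (i + 1) ≤ L := by omega
    have hexp : L + w - 8 * (i + 1) = (L - 8 * (i + 1)) + w := by omega
    rw [hexp, pow_add, Nat.mul_comm (2 ^ (L - 8 * (i + 1))) (2 ^ w), ← Nat.div_div_eq_div_mul]
    congr 3
    rw [Nat.add_comm (N * 2 ^ w) v, Nat.add_mul_div_right _ _ (Nat.pow_pos (by omega)),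
        Nat.div_eq_of_lt hv, Nat.zero_add]
  · rw [List.map_map]
    apply congrArg
    apply List.map_congr_left
    intro i hi
    have hik := List.mem_range.mp hi
    simp only [Function.comp]
    have hbuf : N % 2 ^ (L % 8) * 2 ^ w + v = (N * 2 ^ w + v) % 2 ^ (L % 8 + w) :=
      (pvBufEq N v w (L % 8) hv).symm
    have hj : L % 8 + w - 8 * (i + 1) + 8 ≤ L % 8 + w := by omega
    have hexp : L + w - 8 * (L / 8 + i + 1) = L % 8 + w - 8 * (i + 1) := by omega
    rw [hbuf, pvModDiv _ _ _ hj, hexp]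

theorem pvPush_spec (N L v w : Nat) (hv : v < 2 ^ w) :
    pvPush (pvHexOf N L, N % 2 ^ (L % 8), L % 8) v w
      = (pvHexOf (N * 2 ^ w + v) (L + w), (N * 2 ^ w + v) % 2 ^ ((L + w) % 8), (L + w) % 8) := by
  have hor : (N % 2 ^ (L % 8)) <<< w ||| v = N % 2 ^ (L % 8) * 2 ^ w + v := by
    have h := (Nat.shiftLeft_add_eq_or_of_lt (a := N % 2 ^ (L % 8)) hv).symm
    rw [h, Nat.shiftLeft_eq]
  have hbuf : N % 2 ^ (L % 8) * 2 ^ w + v = (N * 2 ^ w + v) % 2 ^ (L % 8 + w) :=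
    (pvBufEq N v w (L % 8) hv).symm
  have hblt : N % 2 ^ (L % 8) * 2 ^ w + v < 2 ^ (L % 8 + w) := by
    rw [hbuf]; exact Nat.mod_lt _ (Nat.pow_pos (by omega))
  rw [pvPush]
  dsimp only
  rw [hor, pvDrain_spec _ _ _ hblt, pvHexOf_append N L v w hv]
  have hm : (L % 8 + w) % 8 = (L + w) % 8 := by omega
  have hmm : (N * 2 ^ w + v) % 2 ^ (L % 8 + w) % 2 ^ ((L % 8 + w) % 8)
      = (N * 2 ^ w + v) % 2 ^ ((L % 8 + w) % 8) :=
    Nat.mod_mod_of_dvd _ (pow_dvd_pow 2 (Nat.mod_le _ _))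
  rw [hbuf, hmm, hm]

theorem pvFoldAlt (cs : List Char) : ∀ N L, N < 2 ^ L → (∀ c ∈ cs, c.toNat < 128) →
    cs.foldl (fun st c => pvPush st c.toNat 7) (pvHexOf N L, N % 2 ^ (L % 8), L % 8)
      = (pvHexOf (N * 2 ^ (7 * cs.length) + pvBitsToNat (pvFlat cs)) (L + 7 * cs.length),
         (N * 2 ^ (7 * cs.length) + pvBitsToNat (pvFlat cs)) % 2 ^ ((L + 7 * cs.length) % 8),
         (L + 7 * cs.length) % 8) := by
  induction cs with
  | nil => intro N L hN _; simp [pvFlat, pvBitsToNat]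
  | cons c t ih =>
    intro N L hN h
    have hc : c.toNat < 128 := h c (List.mem_cons_self)
    have ht : ∀ x ∈ t, x.toNat < 128 := fun x hx => h x (List.mem_cons_of_mem _ hx)
    have hN' : N * 2 ^ 7 + c.toNat < 2 ^ (L + 7) := by
      rw [pow_add]
      have h1 : N + 1 ≤ 2 ^ L := hN
      nlinarith
    rw [List.foldl_cons, pvPush_spec N L c.toNat 7 (by norm_num; omega), ih _ _ hN' ht]
    have hflat : pvBitsToNat (pvFlat (c :: t)) = c.toNat * 2 ^ (7 * t.length) + pvBitsToNat (pvFlat t) := by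
      have he : pvFlat (c :: t) = pvBin7 c.toNat ++ pvFlat t := by simp [pvFlat]
      rw [he, pvBitsToNat_append, pvFlat_length t ht, (pvBin7_spec c.toNat hc).2]
    have hval : (N * 2 ^ 7 + c.toNat) * 2 ^ (7 * t.length) + pvBitsToNat (pvFlat t)
        = N * 2 ^ (7 * (c :: t).length) + pvBitsToNat (pvFlat (c :: t)) := by
      rw [hflat, List.length_cons]
      have h7 : 7 * (t.length + 1) = 7 * t.length + 7 := by ring
      rw [h7, pow_add]
      ring
    have hL : L + 7 + 7 * t.length = L + 7 * (c :: t).length := by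
      simp [List.length_cons]; ring
    rw [hval, hL]

-- ===== VERDICT (by name: the statement is the Claim_ definition above) =====
theorem pdu7encode_py_spec : Claim_equal_pdu7encode_py := by
  intro s udh hdom
  unfold Spec_pdu7encode_py
  have hall : ∀ c ∈ s.toList.reverse, c.toNat < 128 := by
    intro c hc
    have hd := List.all_eq_true.mp hdom c (List.mem_reverse.mp hc)
    simp only [pvDomChar, Bool.or_eq_true, Bool.and_eq_true, decide_eq_true_eq, beq_iff_eq] at hd
    omega
  -- names for A's bit string and its value/length
  set NB := pvBitsToNat (pvB1 s udh) with hNB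
  set LB := (pvB1 s udh).length with hLB
  -- fold state of B = streaming state of the flat bit string
  have hstart : (([] : List Char), (0 : Nat), (0 : Nat))
      = (pvHexOf 0 0, 0 % 2 ^ (0 % 8), 0 % 8) := by
    simp [pvHexOf]
  have hNf := pvBitsToNat_lt (pvFlat s.toList.reverse)
  rw [pvFlat_length s.toList.reverse hall] at hNf
  have hfold : s.toList.reverse.foldl (fun st c => pvPush st c.toNat 7) ([], 0, 0)
      = (pvHexOf (pvBitsToNat (pvFlat s.toList.reverse)) (7 * s.toList.reverse.length),
         pvBitsToNat (pvFlat s.toList.reverse) % 2 ^ ((7 * s.toList.reverse.length) % 8),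
         (7 * s.toList.reverse.length) % 8) := by
    rw [hstart, pvFoldAlt s.toList.reverse 0 0 (by norm_num) hall]
    norm_num
  -- state after the optional UDH push = streaming state of pvB1
  have hst1 : (if udh then pvPush (s.toList.reverse.foldl (fun st c => pvPush st c.toNat 7) ([], 0, 0)) 0 1
        else s.toList.reverse.foldl (fun st c => pvPush st c.toNat 7) ([], 0, 0))
      = (pvHexOf NB LB, NB % 2 ^ (LB % 8), LB % 8) := by
    cases udh with
    | false =>
      simp only [Bool.false_eq_true, if_false, hfold]
      rw [hNB, hLB]
      simp [pvB1, pvFlat_length s.toList.reverse hall]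
    | true =>
      simp only [if_true, hfold]
      rw [pvPush_spec _ _ 0 1 (by norm_num)]
      have hv : NB = pvBitsToNat (pvFlat s.toList.reverse) * 2 ^ 1 + 0 := by
        rw [hNB]
        simp [pvB1, pvBitsToNat]
        ring
      have hl : LB = 7 * s.toList.reverse.length + 1 := by
        rw [hLB]
        simp [pvB1, pvFlat_length s.toList.reverse hall]
      rw [← hv, ← hl]
  have hNBlt : NB < 2 ^ LB := hLB ▸ hNB ▸ pvBitsToNat_lt (pvB1 s udh)
  -- the final padding push
  set p := (8 - LB % 8) % 8 with hp
  have hfinal : pdu7encode_py_alt s udh = String.mk (pvHexOf (NB * 2 ^ p) (LB + p)) := by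
    unfold pdu7encode_py_alt
    dsimp only
    rw [hst1]
    dsimp only
    by_cases hr : LB % 8 = 0
    · have hp0 : p = 0 := by omega
      simp only [hr, ne_eq, not_true_eq_false, if_false, hp0]
      norm_num
    · simp only [hr, ne_eq, not_false_eq_true, if_true]
      have hpe : p = 8 - LB % 8 := by omega
      rw [hpe, pvPush_spec NB LB 0 (8 - LB % 8) (Nat.pow_pos (by omega))]
      norm_num
  rw [hfinal]
  -- A's side, as before: bytes of the padded bit string
  have hA : pdu7encode_py s udh
      = String.mk (((PySem.List.pyRange 0 ((pvPad (pvB1 s udh)).length : Int) 8).map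
          (fun i => pvHexByte (pvBitsToNat
            (PySem.List.slice (pvPad (pvB1 s udh)) (some i) (some (i + 8)))))).flatten) := rfl
  set k := (LB + p) / 8 with hk
  have h8 : LB + p = 8 * k := by omega
  have hplen : (pvPad (pvB1 s udh)).length = 8 * k := by
    simp only [pvPad, List.length_append, List.length_replicate, ← hLB, ← hp]
    omega
  have hpval : pvBitsToNat (pvPad (pvB1 s udh)) = NB * 2 ^ p := by
    simp only [pvPad, ← hLB, ← hp, hNB]
    rw [pvBitsToNat_append, pvBitsToNat_replicate, List.length_replicate]
    omega
  rw [hA, pvHexEq _ k hplen, hpval, h8]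
  rw [pvHexOf]
  have hk8 : 8 * k / 8 = k := by omega
  rw [hk8]
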